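-- pv_equiv track=rewrite | github.com/Vendning-Machine-Team/Vending_Machine_Robot-Hardware | control_logic.py | _convert_direction_parts_to_fixed_list
-- ===== SOURCE A (Python) =====
-- def _convert_direction_parts_to_fixed_list(direction_parts):
--
--     fixed_direction = [None, None, None, None] # initialize fixed-length list with None values
--
--     for part in direction_parts:
--         if part in ['w', 's']:
--             fixed_direction[0] = part
--         elif part in ['a', 'd']:
--             fixed_direction[1] = part
--         elif part in ['arrowleft', 'arrowright']:
--             fixed_direction[2] = part
--         elif part in ['arrowup', 'arrowdown']:
--             fixed_direction[3] = part
--         elif part in ['w+a', 'w+d', 's+a', 's+d']: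
--             if 'w' in part:
--                 fixed_direction[0] = 'w'
--             elif 's' in part:
--                 fixed_direction[0] = 's'
--             if 'a' in part:
--                 fixed_direction[1] = 'a'
--             elif 'd' in part:
--                 fixed_direction[1] = 'd'
--
--     return fixed_direction
-- ===== SOURCE B (Python) =====
-- def _slot_front(part):
--     # 'w'/'s' component: first character of any token carrying it
--     if part in ('w', 's', 'w+a', 'w+d', 's+a', 's+d'):
--         return part[0]
--     return None
--
-- def _slot_side(part):
--     # 'a'/'d' component: last character of any token carrying it
--     if part in ('a', 'd', 'w+a', 'w+d', 's+a', 's+d'):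
--         return part[-1]
--     return None
--
-- def _slot_arrow_h(part):
--     if part in ('arrowleft', 'arrowright'):
--         return part
--     return None
--
-- def _slot_arrow_v(part):
--     if part in ('arrowup', 'arrowdown'):
--         return part
--     return None
--
-- def _convert_direction_parts_to_fixed_list(direction_parts):
--     # Each slot holds the value contributed by the LAST relevant token,
--     # so compute every slot independently by a back-to-front scan.
--     def last_value(extract):
--         for part in reversed(direction_parts):
--             v = extract(part)
--             if v is not None:
--                 return v
--         return None
--     return [last_value(f)
--             for f in (_slot_front, _slot_side, _slot_arrow_h, _slot_arrow_v)]
-- ===== Notes on version B (the rewrite author's own statement) =====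
-- stated objective: alternative
-- what changed: Instead of A's single forward pass mutating a 4-slot state (last write wins), B computes each slot independently by scanning the tokens back-to-front and taking the first token relevant to that slot, with per-slot extractor functions replacing the if/elif chain.
import Mathlib
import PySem

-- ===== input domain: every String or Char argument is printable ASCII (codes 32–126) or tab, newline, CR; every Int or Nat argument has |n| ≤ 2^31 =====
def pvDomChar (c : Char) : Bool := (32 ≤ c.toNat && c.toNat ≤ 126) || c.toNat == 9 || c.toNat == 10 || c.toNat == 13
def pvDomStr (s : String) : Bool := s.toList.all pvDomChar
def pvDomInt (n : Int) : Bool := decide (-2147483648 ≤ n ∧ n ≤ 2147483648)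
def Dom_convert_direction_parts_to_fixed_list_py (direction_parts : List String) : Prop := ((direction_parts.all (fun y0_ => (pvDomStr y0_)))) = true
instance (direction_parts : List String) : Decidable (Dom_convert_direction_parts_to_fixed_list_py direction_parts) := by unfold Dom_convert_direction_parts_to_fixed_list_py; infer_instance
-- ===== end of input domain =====

-- B replaces A's single forward pass over a mutable 4-slot state (last write wins) by four
-- independent back-to-front scans, one per slot, each taking the first relevant token (alternative).

-- ===== PORT A =====
-- loop body of A: the if/elif chain, updating the fixed 4-slot list in place (List.set)
def pvStepA (fd : List (Option String)) (part : String) : List (Option String) :=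
  if part == "w" || part == "s" then fd.set 0 (some part)
  else if part == "a" || part == "d" then fd.set 1 (some part)
  else if part == "arrowleft" || part == "arrowright" then fd.set 2 (some part)
  else if part == "arrowup" || part == "arrowdown" then fd.set 3 (some part)
  else if part == "w+a" || part == "w+d" || part == "s+a" || part == "s+d" then
    -- 'w' in part / 's' in part (substring tests) then 'a' in part / 'd' in part
    let fd1 := if PySem.Str.isIn "w" part then fd.set 0 (some "w")
               else if PySem.Str.isIn "s" part then fd.set 0 (some "s")
               else fd
    if PySem.Str.isIn "a" part then fd1.set 1 (some "a")
    else if PySem.Str.isIn "d" part then fd1.set 1 (some "d")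
    else fd1
  else fd

def convert_direction_parts_to_fixed_list_py (direction_parts : List String) : List (Option String) :=
  direction_parts.foldl pvStepA [none, none, none, none]

-- ===== PORT B =====
-- the four per-slot extractor helpers of Source B; part[0] / part[-1] via PySem.Str.pyGet?
-- (a Python string index returns a one-character string, hence the .map to String.mk [c])
def pvSlotFront (part : String) : Option String :=
  if part == "w" || part == "s" || part == "w+a" || part == "w+d" || part == "s+a" || part == "s+d" then
    (PySem.Str.pyGet? part 0).map (fun c => String.mk [c])
  else none

def pvSlotSide (part : String) : Option String :=
  if part == "a" || part == "d" || part == "w+a" || part == "w+d" || part == "s+a" || part == "s+d" then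
    (PySem.Str.pyGet? part (-1)).map (fun c => String.mk [c])
  else none

def pvSlotArrowH (part : String) : Option String :=
  if part == "arrowleft" || part == "arrowright" then some part else none

def pvSlotArrowV (part : String) : Option String :=
  if part == "arrowup" || part == "arrowdown" then some part else none

-- last_value: scan reversed(direction_parts), return the first non-None extract(part)
def pvLastValue (direction_parts : List String) (extract : String → Option String) : Option String :=
  direction_parts.reverse.findSome? extract

def convert_direction_parts_to_fixed_list_py_alt (direction_parts : List String) : List (Option String) :=
  [pvSlotFront, pvSlotSide, pvSlotArrowH, pvSlotArrowV].map (pvLastValue direction_parts)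

-- ===== PRECONDITION & SPEC =====
def Spec_convert_direction_parts_to_fixed_list_py (direction_parts : List String) (out : List (Option String)) : Prop := out = convert_direction_parts_to_fixed_list_py_alt direction_parts
instance (direction_parts : List String) (out : List (Option String)) : Decidable (Spec_convert_direction_parts_to_fixed_list_py direction_parts out) := by unfold Spec_convert_direction_parts_to_fixed_list_py; infer_instance

-- ===== CLAIM (what is proved, stated in full; the proofs are below) =====
def Claim_equal_convert_direction_parts_to_fixed_list_py : Prop := ∀ (direction_parts : List String), Dom_convert_direction_parts_to_fixed_list_py direction_parts → Spec_convert_direction_parts_to_fixed_list_py direction_parts (convert_direction_parts_to_fixed_list_py direction_parts)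

-- ===== LEMMAS AND PROOFS =====
-- one step of A's fold merges each slot with the per-slot extractor's value (new value wins)
theorem pvStep_eq (a b c d : Option String) (part : String) :
    pvStepA [a, b, c, d] part =
      [(pvSlotFront part).or a, (pvSlotSide part).or b,
       (pvSlotArrowH part).or c, (pvSlotArrowV part).or d] := by
  by_cases h1 : part = "w"
  · subst h1; rfl
  by_cases h2 : part = "s"
  · subst h2; rfl
  by_cases h3 : part = "a"
  · subst h3; rfl
  by_cases h4 : part = "d"
  · subst h4; rfl
  by_cases h5 : part = "arrowleft"
  · subst h5; rfl
  by_cases h6 : part = "arrowright"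
  · subst h6; rfl
  by_cases h7 : part = "arrowup"
  · subst h7; rfl
  by_cases h8 : part = "arrowdown"
  · subst h8; rfl
  by_cases h9 : part = "w+a"
  · subst h9; rfl
  by_cases h10 : part = "w+d"
  · subst h10; rfl
  by_cases h11 : part = "s+a"
  · subst h11; rfl
  by_cases h12 : part = "s+d"
  · subst h12; rfl
  -- unrecognized token: A falls through every branch, every extractor returns none
  simp [pvStepA, pvSlotFront, pvSlotSide, pvSlotArrowH, pvSlotArrowV,
        h1, h2, h3, h4, h5, h6, h7, h8, h9, h10, h11, h12]

-- A's fold with start state [a,b,c,d] equals the four reverse-first-hit scans merged with the start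
theorem pvFold_eq (l : List String) (a b c d : Option String) :
    l.foldl pvStepA [a, b, c, d] =
      [(l.reverse.findSome? pvSlotFront).or a, (l.reverse.findSome? pvSlotSide).or b,
       (l.reverse.findSome? pvSlotArrowH).or c, (l.reverse.findSome? pvSlotArrowV).or d] := by
  induction l generalizing a b c d with
  | nil => simp
  | cons x l ih =>
      simp only [List.foldl_cons, pvStep_eq, ih, List.reverse_cons, List.findSome?_append,
        Option.or_assoc, List.findSome?_cons, List.findSome?_nil]
      cases pvSlotFront x <;> cases pvSlotSide x <;> cases pvSlotArrowH x <;> cases pvSlotArrowV x <;> simp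

-- ===== VERDICT (by name: the statement is the Claim_ definition above) =====
theorem convert_direction_parts_to_fixed_list_py_spec : Claim_equal_convert_direction_parts_to_fixed_list_py := by
  intro direction_parts _
  unfold Spec_convert_direction_parts_to_fixed_list_py
  unfold convert_direction_parts_to_fixed_list_py convert_direction_parts_to_fixed_list_py_alt
  simp [pvFold_eq, pvLastValue]
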